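-- pv_equiv track=rewrite | github.com/lucaslimasilvafoligem/P1_python | unidade7/inverte/inveter.py | inverte3a3
-- ===== SOURCE A (Python) =====
-- def inverte3a3(s):
--     d = []
--     nova = ''
--     cont = 0
--     for letra in s:
--         nova += letra
--         cont += 1
--         if cont >= 3:
--             d.append(nova)
--             nova = ''
--             cont = 0
--
--     saida = ""
--     for i in range(len(d) - 1, -1, -1):
--         saida += d[i]
--
--     return saida
-- ===== SOURCE B (Python) =====
-- def inverte3a3(s):
--     out = ''
--     while len(s) >= 3:
--         out = s[:3] + out
--         s = s[3:]
--     return out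
-- ===== Notes on version B (the rewrite author's own statement) =====
-- stated objective: simpler
-- what changed: B replaces A's char-by-char accumulation into a list of chunks followed by a reversed index loop with a single while loop that peels the leading 3-char chunk off the string and prepends it to the output, so no list and no second pass are needed.
import Mathlib
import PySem

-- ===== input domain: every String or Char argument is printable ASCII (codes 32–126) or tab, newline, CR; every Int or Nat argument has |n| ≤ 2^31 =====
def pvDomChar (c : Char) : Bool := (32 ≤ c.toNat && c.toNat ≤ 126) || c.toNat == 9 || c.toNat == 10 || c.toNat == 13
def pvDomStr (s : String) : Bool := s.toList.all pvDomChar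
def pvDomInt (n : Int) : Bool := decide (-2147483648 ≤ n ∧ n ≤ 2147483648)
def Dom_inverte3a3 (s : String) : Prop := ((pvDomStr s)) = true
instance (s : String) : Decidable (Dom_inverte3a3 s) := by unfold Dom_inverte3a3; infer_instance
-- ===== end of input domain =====

-- B replaces A's char accumulation + chunk list + reversed index loop with one while loop
-- peeling the leading 3-char chunk and prepending it to the output; same return value, simpler.
-- Strings are handled on the code-point list side (PySem.Chars convention; exact).

-- ===== PORT A =====
-- state (d, nova, cont); one iteration of A's first for-loop
def aStep (st : List (List Char) × List Char × Int) (letra : Char) :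
    List (List Char) × List Char × Int :=
  let nova := st.2.1 ++ [letra]
  let cont := st.2.2 + 1
  if cont ≥ 3 then (st.1 ++ [nova], [], 0) else (st.1, nova, cont)

def inverte3a3 (s : String) : String :=
  let st := s.toList.foldl aStep ([], [], 0)
  let d := st.1
  let saida := (PySem.List.pyRange ((d.length : Int) - 1) (-1) (-1)).foldl
      (fun saida i => saida ++ PySem.List.pyGetD d i []) ([] : List Char)
  String.ofList saida

-- ===== PORT B =====
-- the while loop: while len(s) >= 3: out = s[:3] + out; s = s[3:]
def altLoop (l out : List Char) : List Char :=
  if 3 ≤ l.length then altLoop (l.drop 3) (l.take 3 ++ out) else out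
termination_by l.length
decreasing_by simp [List.length_drop]; omega

def inverte3a3_alt (s : String) : String := String.ofList (altLoop s.toList [])

-- ===== PRECONDITION & SPEC =====
def Spec_inverte3a3 (s : String) (out : String) : Prop := out = inverte3a3_alt s
instance (s : String) (out : String) : Decidable (Spec_inverte3a3 s out) := by unfold Spec_inverte3a3; infer_instance

-- ===== CLAIM (what is proved, stated in full; the proofs are below) =====
def Claim_equal_inverte3a3 : Prop := ∀ (s : String), Dom_inverte3a3 s → Spec_inverte3a3 s (inverte3a3 s)

-- ===== LEMMAS AND PROOFS =====

-- the list of complete 3-char chunks of l, in order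
def chunks3 : List Char → List (List Char)
  | a :: b :: c :: t => [a, b, c] :: chunks3 t
  | _ => []

theorem foldl_aStep (l : List Char) (d0 : List (List Char)) :
    (l.foldl aStep (d0, [], 0)).1 = d0 ++ chunks3 l := by
  match l with
  | [] => simp [chunks3]
  | [a] => simp [chunks3, aStep]
  | [a, b] => simp [chunks3, aStep]
  | a :: b :: c :: t =>
    have ih := foldl_aStep t (d0 ++ [[a, b, c]])
    simpa [chunks3, aStep, List.foldl] using ih
termination_by l.length

theorem foldl_range_rev (d : List (List Char)) (k : Nat) (hk : k ≤ d.length)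
    (acc : List Char) :
    (PySem.List.pyRange ((k : Int) - 1) (-1) (-1)).foldl
      (fun saida i => saida ++ PySem.List.pyGetD d i []) acc
    = acc ++ ((d.take k).reverse).flatten := by
  induction k generalizing acc with
  | zero => simp [PySem.List.pyRange_neg_one_eq_nil]
  | succ k ih =>
    rw [show ((k + 1 : Nat) : Int) - 1 = (k : Int) by push_cast; ring]
    rw [PySem.List.pyRange_neg_one_cons (by omega)]
    rw [List.foldl_cons, ih (by omega)]
    have hget : PySem.List.pyGetD d (k : Int) [] = d[k]'(by omega) := by
      simp [PySem.List.pyGetD_natCast, List.getD_eq_getElem?_getD, List.getElem?_eq_getElem (by omega : k < d.length)]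
    have htake : List.take (k + 1) d = List.take k d ++ [d[k]'(by omega)] := by
      rw [List.take_add_one, List.getElem?_eq_getElem (show k < d.length by omega)]
      simp
    rw [hget, htake, List.reverse_append, List.flatten_append, List.reverse_singleton]
    simp only [List.flatten_cons, List.flatten_nil, List.append_nil, List.append_assoc]

theorem altLoop_eq (l out : List Char) :
    altLoop l out = (chunks3 l).reverse.flatten ++ out := by
  match l with
  | [] => simp [altLoop, chunks3]
  | [a] => simp [altLoop, chunks3]
  | [a, b] => simp [altLoop, chunks3]
  | a :: b :: c :: t =>
    rw [altLoop]
    simp only [List.length_cons, List.drop, List.take]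
    rw [if_pos (by omega), altLoop_eq t ([a, b, c] ++ out)]
    simp [chunks3]
termination_by l.length

-- ===== VERDICT (by name: the statement is the Claim_ definition above) =====
theorem inverte3a3_spec : Claim_equal_inverte3a3 := by
  intro s _
  have hd := foldl_aStep s.toList []
  simp only [List.nil_append] at hd
  have hr := foldl_range_rev (chunks3 s.toList) (chunks3 s.toList).length le_rfl []
  simp only [List.nil_append, List.take_length] at hr
  unfold Spec_inverte3a3 inverte3a3 inverte3a3_alt
  rw [altLoop_eq]
  simp only [hd, hr, List.append_nil]
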